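-- pv_equiv track=rewrite | github.com/leo-salcedo/TIP102 | Walmart Practice/transactions.py | function
-- ===== SOURCE A (Python) =====
-- def function(transactions):
--     customer_to_event_data = {}
--     for customer, event, money in transactions:
--         event_money = int(money)
--         if customer not in customer_to_event_data:
--             customer_to_event_data[customer] = (1, event_money)
--         else:
--             total_events, total_money = customer_to_event_data[customer]
--             customer_to_event_data[customer] = (total_events + 1, total_money + event_money)
--     return customer_to_event_data
-- ===== SOURCE B (Python) =====
-- def function(transactions):
--     customers = list(dict.fromkeys(c for c, _, _ in transactions))
--     def stats(c):
--         amounts = [int(money) for customer, _, money in transactions if customer == c]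
--         return (len(amounts), sum(amounts))
--     return {c: stats(c) for c in customers}
-- ===== Notes on version B (the rewrite author's own statement) =====
-- stated objective: alternative
-- what changed: B replaces A's single-pass dict with an incremental (count,sum) accumulator by a staged algorithm: first dedupe the customer list in first-appearance order, then for each distinct customer rescan the whole transaction list, taking the length and sum of its parsed amounts; no running accumulator or present/absent branch remains.
import Mathlib
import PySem

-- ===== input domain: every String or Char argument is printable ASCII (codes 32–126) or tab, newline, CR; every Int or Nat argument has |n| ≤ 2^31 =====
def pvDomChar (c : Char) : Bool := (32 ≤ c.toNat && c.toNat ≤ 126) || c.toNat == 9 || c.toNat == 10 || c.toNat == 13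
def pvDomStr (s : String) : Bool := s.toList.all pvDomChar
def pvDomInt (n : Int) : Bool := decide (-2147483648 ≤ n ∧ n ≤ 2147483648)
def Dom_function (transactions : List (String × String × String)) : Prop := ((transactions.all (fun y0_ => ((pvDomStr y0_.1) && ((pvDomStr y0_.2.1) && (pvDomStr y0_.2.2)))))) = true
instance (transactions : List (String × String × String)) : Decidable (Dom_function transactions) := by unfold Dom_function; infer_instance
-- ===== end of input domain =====

-- B drops A's incremental accumulator: it dedups the customers (first-appearance order) and then
-- rescans the whole transaction list per customer for count and sum (return-value equivalence).


-- ===== PORT A =====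
-- int(money); Pre_function guarantees it parses, so the .getD 0 default is never used inside Pre_
def pvMoney (t : String × String × String) : Int := (PySem.Int.ofStr? t.2.2).getD 0

def function (transactions : List (String × String × String)) : List (String × Int × Int) :=
  let d := transactions.foldl (fun d t =>
    let em := pvMoney t
    if d.contains t.1 = false then
      d.insert t.1 (1, em)
    else
      let p := d.getD t.1 (0, 0)
      d.insert t.1 (p.1 + 1, p.2 + em)) PySem.Dict.empty
  d.items

-- ===== PORT B =====
-- stats(c): length and sum of the parsed amounts of c's transactions (one full rescan per customer)
def pvStats (transactions : List (String × String × String)) (c : String) : Int × Int :=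
  let amounts := (transactions.filter (fun t => t.1 == c)).map pvMoney
  ((amounts.length : Int), amounts.sum)

def function_alt (transactions : List (String × String × String)) : List (String × Int × Int) :=
  let customers := PySem.List.dedup (transactions.map (fun t => t.1))
  customers.map (fun c => (c, pvStats transactions c))

-- ===== PRECONDITION & SPEC =====
-- Pre_ excludes exactly the inputs where int(money) raises ValueError (in A and in B alike).
def Pre_function (transactions : List (String × String × String)) : Prop :=
  ∀ t ∈ transactions, (PySem.Int.ofStr? t.2.2).isSome = true
instance (transactions : List (String × String × String)) : Decidable (Pre_function transactions) := by unfold Pre_function; infer_instance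
def pvWitness_function : (List (String × String × String)) := [("alice", "buy", "3"), ("bob", "sell", "-2"), ("alice", "buy", "10")]

def Spec_function (transactions : List (String × String × String)) (out : List (String × Int × Int)) : Prop := out = function_alt transactions
instance (transactions : List (String × String × String)) (out : List (String × Int × Int)) : Decidable (Spec_function transactions out) := by unfold Spec_function; infer_instance

-- ===== CLAIM (what is proved, stated in full; the proofs are below) =====
def Claim_equal_function : Prop := ∀ (transactions : List (String × String × String)), Dom_function transactions → Pre_function transactions → Spec_function transactions (function transactions)

-- ===== LEMMAS AND PROOFS =====

-- A's loop body written as a single unconditional insert (both branches insert at t.1).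
lemma stepA_eq : (fun (d : PySem.Dict String (Int × Int)) (t : String × String × String) =>
    let em := pvMoney t
    if d.contains t.1 = false then d.insert t.1 (1, em)
    else
      let p := d.getD t.1 (0, 0)
      d.insert t.1 (p.1 + 1, p.2 + em))
  = (fun d t => d.insert t.1 (((d.getD t.1 (0, 0)).1 + 1, (d.getD t.1 (0, 0)).2 + pvMoney t))) := by
  funext d t
  by_cases h : d.contains t.1 = false
  · simp [PySem.Dict.getD_of_not_contains, h]
  · simp [h]

-- After A's whole loop, the entry for c is the initial entry plus c's (count, sum) over the list.
lemma getD_fold (ts : List (String × String × String)) (d : PySem.Dict String (Int × Int)) (c : String) :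
    (ts.foldl (fun d t => d.insert t.1 (((d.getD t.1 (0, 0)).1 + 1, (d.getD t.1 (0, 0)).2 + pvMoney t))) d).getD c (0, 0)
    = ((d.getD c (0, 0)).1 + (((ts.filter (fun t => t.1 == c)).map pvMoney).length : Int),
       (d.getD c (0, 0)).2 + ((ts.filter (fun t => t.1 == c)).map pvMoney).sum) := by
  induction ts generalizing d with
  | nil => simp
  | cons t ts ih =>
    simp only [List.foldl_cons, ih, List.filter_cons]
    rw [PySem.Dict.getD_insert]
    by_cases hc : t.1 = c
    · simp [hc, Prod.ext_iff]
      constructor <;> ring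
    · simp [hc, Ne.symm hc]

-- ===== VERDICT (by name: the statement is the Claim_ definition above) =====
theorem function_spec : Claim_equal_function := by
  intro ts _ _
  show function ts = function_alt ts
  unfold function function_alt
  rw [stepA_eq]
  set fA := ts.foldl (fun d t => d.insert t.1 (((d.getD t.1 (0, 0)).1 + 1, (d.getD t.1 (0, 0)).2 + pvMoney t))) (PySem.Dict.empty : PySem.Dict String (Int × Int)) with hfA
  have hnd : fA.keys.Nodup := by
    rw [hfA]
    exact PySem.Dict.nodup_keys_foldl_insert_key ts (·.1) _ _ (by simp [PySem.Dict.keys_empty])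
  rw [PySem.Dict.items_eq_map_keys fA hnd (0, 0)]
  have hkeys : fA.keys = PySem.List.dedup (ts.map (fun t => t.1)) := by
    rw [hfA, PySem.Dict.keys_foldl_insert_key, PySem.List.dedup_eq_ofList]
    rfl
  rw [hkeys]
  apply List.map_congr_left
  intro c _
  have := getD_fold ts PySem.Dict.empty c
  rw [hfA, this]
  simp [pvStats, PySem.Dict.getD_empty]
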